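-- pv_equiv track=rewrite | github.com/fzl96/network-automation-tools | aci/lib/utils.py | parse_urib_dn
-- ===== SOURCE A (Python) =====
-- def parse_urib_dn(dn):
--     """
--     Example DN:
--     topology/pod-1/node-201/sys/uribv4/dom-overlay-1/db-rt/rt-[10.0.152.67/32]
--     """
--     node = ""
--     domain = ""
--     prefix = ""
--
--     parts = dn.split("/")
--
--     for p in parts:
--         if p.startswith("node-"):
--             node = p
--         elif p.startswith("dom-"):
--             domain = p.replace("dom-", "")
--
--     if "rt-[" in dn:
--         prefix = dn.split("rt-[", 1)[1].rstrip("]")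
--
--     return node, domain, prefix
-- ===== SOURCE B (Python) =====
-- def _last_seg(dn, tag):
--     # rightmost position where tag starts a '/'-delimited segment; return that segment
--     for p in range(len(dn) - len(tag), -1, -1):
--         if dn.startswith(tag, p) and (p == 0 or dn[p - 1] == "/"):
--             j = dn.find("/", p)
--             return dn[p:] if j < 0 else dn[p:j]
--     return ""
--
--
-- def parse_urib_dn(dn):
--     node = _last_seg(dn, "node-")
--     domain = _last_seg(dn, "dom-").replace("dom-", "")
--     k = dn.find("rt-[")
--     prefix = dn[k + 4:].rstrip("]") if k >= 0 else ""
--     return node, domain, prefix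
-- ===== Notes on version B (the rewrite author's own statement) =====
-- stated objective: alternative
-- what changed: A splits the DN into slash-separated segments and overwrites node/domain in a forward loop over the parts list; B never builds a parts list: it scans raw string positions backwards with startswith to find the rightmost slash-boundary occurrence of each tag and slices that segment out, and extracts the prefix by find-and-slice instead of A's guarded split(...,1)[1].
import Mathlib
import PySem

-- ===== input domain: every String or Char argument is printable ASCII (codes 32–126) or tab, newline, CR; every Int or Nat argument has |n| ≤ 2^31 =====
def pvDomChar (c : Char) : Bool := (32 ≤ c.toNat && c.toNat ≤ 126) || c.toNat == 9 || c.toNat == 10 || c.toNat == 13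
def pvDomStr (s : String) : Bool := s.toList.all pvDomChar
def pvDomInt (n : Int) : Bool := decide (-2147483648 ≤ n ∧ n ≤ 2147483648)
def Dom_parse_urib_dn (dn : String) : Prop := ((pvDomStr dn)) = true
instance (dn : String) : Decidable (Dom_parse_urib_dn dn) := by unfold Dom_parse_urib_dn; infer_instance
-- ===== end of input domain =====

-- B drops A's split-into-segments pass entirely: it scans raw string positions backwards for the
-- rightmost slash-boundary occurrence of each tag and slices the segment out (objective: alternative).

-- shared helper: s.rstrip("]") — hand port of str.rstrip with the single strip char ']'
-- (exact: removes every trailing ']'); both Pythons call .rstrip("]")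
def pyRstripBracket (s : String) : String :=
  String.ofList ((s.toList.reverse.dropWhile (fun c => c == ']')).reverse)

-- ===== PORT A =====
-- A-side helper: dn.split("/") — the separator "/" is nonempty, so Python never raises
def pySplitSlash (s : String) : List String := (PySem.Str.split? s "/").getD []

def parse_urib_dn (dn : String) : String × String × String :=
  let parts := pySplitSlash dn
  let nd := parts.foldl (fun (st : String × String) p =>
      if PySem.Str.startswith p "node-" then (p, st.2)
      else if PySem.Str.startswith p "dom-" then (st.1, PySem.Str.replace p "dom-" "")
      else st) ("", "")
  let pre : String :=
    if PySem.Str.isIn "rt-[" dn then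
      -- dn.split("rt-[", 1)[1]: the 'in' guard holds, so the split has a second piece
      pyRstripBracket ((PySem.List.pyGet? ((PySem.Str.splitMax? dn "rt-[" 1).getD []) 1).getD "")
    else ""
  (nd.1, nd.2, pre)

-- ===== PORT B =====
-- B-side helpers: the body of _last_seg's for-loop once a boundary match at position p is found:
-- j = dn.find("/", p); dn[p:] if j < 0 else dn[p:j]
def pvSegAt (chars : List Char) (p : Nat) : List Char :=
  let j := PySem.Chars.findFrom chars ['/'] (p : Int) none
  if j < 0 then PySem.List.slice chars (some (p : Int)) none
  else PySem.List.slice chars (some (p : Int)) (some j)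

-- the for-loop of _last_seg: first p in range(len(dn)-len(tag), -1, -1) with
-- dn.startswith(tag, p) and (p == 0 or dn[p-1] == "/");  dn.startswith(tag, p) for
-- 0 ≤ p is exactly tag.isPrefixOf (chars.drop p)
def pvPosB (chars tag : List Char) : Option Nat :=
  (List.range (chars.length + 1 - tag.length)).reverse.find?
    (fun p => tag.isPrefixOf (chars.drop p) && (p == 0 || chars[p - 1]? == some '/'))

-- _last_seg(dn, tag)
def pvLastSeg (chars tag : List Char) : List Char :=
  match pvPosB chars tag with
  | none => []
  | some p => pvSegAt chars p

def parse_urib_dn_alt (dn : String) : String × String × String :=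
  let node := String.ofList (pvLastSeg dn.toList "node-".toList)
  let domain := PySem.Str.replace (String.ofList (pvLastSeg dn.toList "dom-".toList)) "dom-" ""
  let k := PySem.Str.find dn "rt-["
  let pre := if 0 ≤ k then pyRstripBracket (PySem.Str.slice dn (some (k + 4)) none) else ""
  (node, domain, pre)

-- ===== PRECONDITION & SPEC =====
def Spec_parse_urib_dn (dn : String) (out : String × String × String) : Prop := out = parse_urib_dn_alt dn
instance (dn : String) (out : String × String × String) : Decidable (Spec_parse_urib_dn dn out) := by unfold Spec_parse_urib_dn; infer_instance

-- ===== CLAIM (what is proved, stated in full; the proofs are below) =====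
def Claim_equal_parse_urib_dn : Prop := ∀ (dn : String), Dom_parse_urib_dn dn → Spec_parse_urib_dn dn (parse_urib_dn dn)

-- ===== LEMMAS AND PROOFS =====

-- a segment starting with "node-" does not start with "dom-" (first characters differ)
theorem pv_disj_node_dom (p : String) (h : PySem.Str.startswith p "node-" = true) :
    PySem.Str.startswith p "dom-" = false := by
  by_contra hc
  simp only [Bool.not_eq_false] at hc
  rw [PySem.Str.startswith_eq, PySem.Chars.startswith_iff] at h hc
  obtain ⟨t1, e1⟩ := h
  obtain ⟨t2, e2⟩ := hc
  rw [← e1] at e2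
  simp at e2

-- A's overwrite loop computes, in each component, the LAST matching segment,
-- i.e. the first match scanning the reversed list
theorem pv_loop_last (l : List String) : ∀ (a b : String),
    l.foldl (fun (st : String × String) p =>
        if PySem.Str.startswith p "node-" then (p, st.2)
        else if PySem.Str.startswith p "dom-" then (st.1, PySem.Str.replace p "dom-" "")
        else st) (a, b) =
      ((l.reverse.find? (fun p => PySem.Str.startswith p "node-")).getD a,
       ((l.reverse.find? (fun p => PySem.Str.startswith p "dom-")).map
          (fun p => PySem.Str.replace p "dom-" "")).getD b) := by
  induction l with
  | nil => intro a b; simp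
  | cons x t ih =>
    intro a b
    simp only [List.foldl_cons, List.reverse_cons, List.find?_append]
    by_cases hn : PySem.Str.startswith x "node-"
    · have hd := pv_disj_node_dom x hn
      have hn' : PySem.Chars.startswith x.toList ['n','o','d','e','-'] = true := by simpa using hn
      have hd' : PySem.Chars.startswith x.toList ['d','o','m','-'] = false := by simpa using hd
      rw [if_pos hn, ih]
      cases t.reverse.find? (fun p => PySem.Str.startswith p "node-") <;>
        cases t.reverse.find? (fun p => PySem.Str.startswith p "dom-") <;>
          simp [hn', hd']
    · by_cases hdm : PySem.Str.startswith x "dom-"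
      · have hn' : PySem.Chars.startswith x.toList ['n','o','d','e','-'] = false := by
          simpa using hn
        have hd' : PySem.Chars.startswith x.toList ['d','o','m','-'] = true := by simpa using hdm
        rw [if_neg hn, if_pos hdm, ih]
        cases t.reverse.find? (fun p => PySem.Str.startswith p "node-") <;>
          cases t.reverse.find? (fun p => PySem.Str.startswith p "dom-") <;>
            simp [hn', hd']
      · have hn' : PySem.Chars.startswith x.toList ['n','o','d','e','-'] = false := by
          simpa using hn
        have hd' : PySem.Chars.startswith x.toList ['d','o','m','-'] = false := by
          simpa using hdm
        rw [if_neg hn, if_neg hdm, ih]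
        cases t.reverse.find? (fun p => PySem.Str.startswith p "node-") <;>
          cases t.reverse.find? (fun p => PySem.Str.startswith p "dom-") <;>
            simp [hn', hd']

-- find.go with start offset k is the k-shift of find.go at 0
theorem pv_findGo_shift (sub : List Char) (l : List Char) : ∀ (k : Nat),
    PySem.Chars.find.go sub l k =
      if PySem.Chars.find.go sub l 0 = -1 then -1 else PySem.Chars.find.go sub l 0 + k := by
  induction l with
  | nil => intro k; rw [PySem.Chars.find.go, PySem.Chars.find.go]; by_cases h : sub.isEmpty <;> simp [h]
  | cons c rest ih =>
    intro k
    rw [PySem.Chars.find.go]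
    conv_rhs => rw [PySem.Chars.find.go]
    by_cases h : sub.isPrefixOf (c :: rest) <;> simp [h]
    rw [ih (k+1), ih 1]
    have hb : -1 ≤ PySem.Chars.find.go sub rest 0 := PySem.Chars.neg_one_le_find rest sub
    by_cases hg : PySem.Chars.find.go sub rest 0 = -1
    · simp [hg]
    · rw [if_neg hg, if_neg hg, if_neg (by push_cast; omega)]
      push_cast; omega

theorem pv_find_cons_of_not_prefix (sub : List Char) (c : Char) (rest : List Char)
    (h : sub.isPrefixOf (c :: rest) = false) :
    PySem.Chars.find (c :: rest) sub =
      if PySem.Chars.find rest sub = -1 then -1 else PySem.Chars.find rest sub + 1 := by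
  show PySem.Chars.find.go sub (c :: rest) 0 = _
  rw [PySem.Chars.find.go]
  simp [h]
  rw [pv_findGo_shift sub rest 1]
  rfl

theorem pv_find_cons_of_prefix (sub : List Char) (c : Char) (rest : List Char)
    (h : sub.isPrefixOf (c :: rest) = true) :
    PySem.Chars.find (c :: rest) sub = 0 := by
  show PySem.Chars.find.go sub (c :: rest) 0 = _
  rw [PySem.Chars.find.go]; simp [h]

-- with maxsplit exhausted, the scanner emits the rest as the final piece
theorem pv_splitGo_zero (sub : List Char) (fuel : Nat) (l cur : List Char) (acc : List (List Char)) :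
    PySem.Chars.splitOnMax.go sub fuel 0 l cur acc = ((cur.reverse ++ l) :: acc).reverse := by
  cases fuel with
  | zero => rw [PySem.Chars.splitOnMax.go]
  | succ f => cases l with
    | nil => rw [PySem.Chars.splitOnMax.go] <;> simp
    | cons c rest => rw [PySem.Chars.splitOnMax.go]; simp

-- s.split(sep, 1): characterised by the FIRST occurrence position (Chars.find)
theorem pv_splitGo_one (sub : List Char) (hsub : sub ≠ []) : ∀ (l : List Char) (fuel : Nat)
    (cur : List Char) (acc : List (List Char)), l.length < fuel →
    PySem.Chars.splitOnMax.go sub fuel 1 l cur acc =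
      if PySem.Chars.find l sub = -1 then acc.reverse ++ [cur.reverse ++ l]
      else acc.reverse ++ [cur.reverse ++ l.take (PySem.Chars.find l sub).toNat,
            l.drop ((PySem.Chars.find l sub).toNat + sub.length)] := by
  intro l
  induction l with
  | nil =>
    intro fuel cur acc hf
    cases fuel with
    | zero => omega
    | succ f =>
      rw [PySem.Chars.splitOnMax.go]
      case x_7 => simp
      have : PySem.Chars.find [] sub = -1 := by
        show PySem.Chars.find.go sub [] 0 = -1
        rw [PySem.Chars.find.go]; simp [List.isEmpty_iff, hsub]
      simp [this]
  | cons c rest ih =>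
    intro fuel cur acc hf
    cases fuel with
    | zero => omega
    | succ f =>
      rw [PySem.Chars.splitOnMax.go]
      by_cases h : sub.isPrefixOf (c :: rest)
      · simp only [h, if_true, if_neg (by omega : (1:Nat) ≠ 0)]
        rw [pv_splitGo_zero]
        rw [pv_find_cons_of_prefix sub c rest h]
        simp
      · simp only [Bool.not_eq_true] at h
        simp only [h, Bool.false_eq_true, if_false, if_neg (by omega : (1:Nat) ≠ 0)]
        rw [ih f (c :: cur) acc (by simp at hf ⊢; omega)]
        rw [pv_find_cons_of_not_prefix sub c rest h]
        have hge : -1 ≤ PySem.Chars.find rest sub := PySem.Chars.neg_one_le_find rest sub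
        by_cases hr : PySem.Chars.find rest sub = -1
        · simp [hr]
        · have h0 : 0 ≤ PySem.Chars.find rest sub := by omega
          simp only [hr, if_false, if_neg (by omega : ¬ PySem.Chars.find rest sub + 1 = -1)]
          have : (PySem.Chars.find rest sub + 1).toNat = (PySem.Chars.find rest sub).toNat + 1 := by
            omega
          rw [this]
          have e2 : (PySem.Chars.find rest sub).toNat + 1 + sub.length
              = ((PySem.Chars.find rest sub).toNat + sub.length) + 1 := by omega
          simp [List.take_succ_cons, e2, List.drop_succ_cons]

-- the prefix component: A's guarded split(…,1)[1] equals B's find-and-slice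
theorem pv_prefix_eq (dn : String) :
    (if PySem.Str.isIn "rt-[" dn then
        pyRstripBracket ((PySem.List.pyGet? ((PySem.Str.splitMax? dn "rt-[" 1).getD []) 1).getD "")
      else "") =
    (if 0 ≤ PySem.Str.find dn "rt-[" then
        pyRstripBracket (PySem.Str.slice dn (some (PySem.Str.find dn "rt-[" + 4)) none)
      else "") := by
  have hsub : ("rt-[".toList : List Char) ≠ [] := by decide
  have hlen4 : ("rt-[".toList : List Char).length = 4 := by decide
  have hIsIn : PySem.Str.isIn "rt-[" dn
      = (PySem.Chars.find dn.toList "rt-[".toList != -1) := rfl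
  have hFind : PySem.Str.find dn "rt-[" = PySem.Chars.find dn.toList "rt-[".toList := rfl
  have hge : -1 ≤ PySem.Chars.find dn.toList "rt-[".toList :=
    PySem.Chars.neg_one_le_find _ _
  by_cases h : PySem.Chars.find dn.toList "rt-[".toList = -1
  · rw [hIsIn, if_neg (by simpa using h), hFind, if_neg (by omega)]
  · have h0 : 0 ≤ PySem.Chars.find dn.toList "rt-[".toList := by omega
    rw [hIsIn, if_pos (by simpa using h), hFind, if_pos h0]
    congr 1
    -- identify A's split piece
    have hmap := PySem.Str.splitMax?_map dn "rt-[" 1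
    rw [PySem.Chars.splitMax?] at hmap
    rw [if_neg (by simp)] at hmap
    rw [PySem.Chars.splitOnMax] at hmap
    rw [if_neg (by omega)] at hmap
    have hone : (1 : Int).toNat = 1 := rfl
    rw [hone, pv_splitGo_one "rt-[".toList hsub dn.toList (dn.toList.length + 1) [] []
      (by omega), if_neg h] at hmap
    cases hA : PySem.Str.splitMax? dn "rt-[" 1 with
    | none => rw [hA] at hmap; simp at hmap
    | some L =>
      rw [hA] at hmap
      simp only [Option.map_some, Option.some.injEq] at hmap
      cases L with
      | nil => simp at hmap
      | cons x L' =>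
        cases L' with
        | nil => simp at hmap
        | cons y L'' =>
          cases L'' with
          | cons z L3 => simp at hmap
          | nil =>
            simp only [List.map_cons, List.map_nil, List.reverse_nil, List.nil_append,
              List.cons.injEq, and_true] at hmap
            have hy : y.toList = dn.toList.drop
                ((PySem.Chars.find dn.toList "rt-[".toList).toNat + "rt-[".toList.length) :=
              hmap.2
            have hget : PySem.List.pyGet? [x, y] (1 : Int) = some y := by
              simp [PySem.List.pyGet?, PySem.List.pyIdx?]
            simp only [Option.getD_some, hget]
            -- identify B's slice
            apply String.toList_inj.mp
            rw [hy, PySem.Str.toList_slice, PySem.Chars.slice_eq_listSlice,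
              PySem.List.slice_from dn.toList (by omega), hlen4]
            congr 1
            omega

-- ---- char-level split on '/' (proof-side canonical form) ----
def pvConsHead (c : Char) : List (List Char) → List (List Char)
  | [] => [[c]]
  | x :: xs => (c :: x) :: xs

def pvSplitSlash : List Char → List (List Char)
  | [] => [[]]
  | c :: rest => if c = '/' then [] :: pvSplitSlash rest else pvConsHead c (pvSplitSlash rest)

theorem pvSplitSlash_ne_nil (l : List Char) : pvSplitSlash l ≠ [] := by
  cases l with
  | nil => simp [pvSplitSlash]
  | cons c rest =>
    simp only [pvSplitSlash]
    split
    · simp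
    · cases h : pvSplitSlash rest <;> simp [pvConsHead]

-- splitOn.go with separator "/" computes pvSplitSlash
theorem pv_splitOnGo_eq (l : List Char) : ∀ (fuel : Nat) (cur : List Char)
    (acc : List (List Char)), l.length < fuel →
    PySem.Chars.splitOn.go ['/'] fuel l cur acc =
      acc.reverse ++ (match pvSplitSlash l with
        | [] => []
        | x :: xs => (cur.reverse ++ x) :: xs) := by
  induction l with
  | nil =>
    intro fuel cur acc hf
    cases fuel with
    | zero => omega
    | succ f =>
      rw [PySem.Chars.splitOn.go]
      · simp [pvSplitSlash]
      · omega
  | cons c rest ih =>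
    intro fuel cur acc hf
    cases fuel with
    | zero => omega
    | succ f =>
      rw [PySem.Chars.splitOn.go]
      by_cases hc : c = '/'
      · subst hc
        have hpre : (['/'] : List Char).isPrefixOf ('/' :: rest) = true := by
          simp [List.isPrefixOf]
        rw [if_pos hpre]
        have hdrop : List.drop (['/'] : List Char).length ('/' :: rest) = rest := rfl
        rw [hdrop, ih f [] (cur.reverse :: acc) (by simp at hf ⊢; omega)]
        cases hps : pvSplitSlash rest with
        | nil => exact absurd hps (pvSplitSlash_ne_nil rest)
        | cons x xs => simp [pvSplitSlash, hps]
      · have hpre : (['/'] : List Char).isPrefixOf (c :: rest) = false := by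
          simp [List.isPrefixOf]
          exact fun e => hc e.symm
        rw [if_neg (by simp [hpre])]
        rw [ih f (c :: cur) acc (by simp at hf ⊢; omega)]
        cases hps : pvSplitSlash rest with
        | nil => exact absurd hps (pvSplitSlash_ne_nil rest)
        | cons x xs => simp [pvSplitSlash, if_neg hc, hps, pvConsHead]

theorem pv_splitOn_eq (l : List Char) :
    PySem.Chars.splitOn l ['/'] = pvSplitSlash l := by
  show PySem.Chars.splitOn.go ['/'] (l.length + 1) l [] [] = _
  rw [pv_splitOnGo_eq l (l.length + 1) [] [] (by omega)]
  cases hps : pvSplitSlash l with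
  | nil => exact absurd hps (pvSplitSlash_ne_nil l)
  | cons x xs => simp

-- ---- properties of pvSplitSlash ----
theorem pvSplitSlash_no_slash (l : List Char) (h : '/' ∉ l) : pvSplitSlash l = [l] := by
  induction l with
  | nil => rfl
  | cons c rest ih =>
    simp only [List.mem_cons, not_or] at h
    simp only [pvSplitSlash, if_neg (fun e : c = '/' => h.1 e.symm)]
    rw [ih h.2]
    rfl

theorem pvSplitSlash_append (seg rest : List Char) (h : '/' ∉ seg) :
    pvSplitSlash (seg ++ '/' :: rest) = seg :: pvSplitSlash rest := by
  induction seg with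
  | nil => simp [pvSplitSlash]
  | cons c seg' ih =>
    simp only [List.mem_cons, not_or] at h
    simp only [List.cons_append, pvSplitSlash, if_neg (fun e : c = '/' => h.1 e.symm)]
    rw [ih h.2]
    rfl

-- ---- the backward position scan finds the last boundary occurrence ----

-- find? over a descending range when only position 0 can satisfy the predicate
theorem pv_find_range_rev_zero (P : Nat → Bool) (n : Nat)
    (h : ∀ p, 1 ≤ p → p < n → P p = false) :
    (List.range n).reverse.find? P = if 0 < n ∧ P 0 = true then some 0 else none := by
  induction n with
  | zero => simp
  | succ m ih =>
    rw [List.range_succ, List.reverse_append]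
    simp only [List.reverse_singleton, List.singleton_append, List.find?_cons]
    cases m with
    | zero => cases hP : P 0 <;> simp
    | succ k =>
      rw [h (k + 1) (by omega) (by omega)]
      rw [ih (fun p h1 h2 => h p h1 (by omega))]
      by_cases hP : P 0 = true
      · rw [if_pos ⟨by omega, hP⟩, if_pos ⟨by omega, hP⟩]
      · rw [if_neg (fun hc => hP hc.2), if_neg (fun hc => hP hc.2)]

-- tag without '/' is a prefix of seg ++ '/' :: rest iff it is a prefix of seg
theorem pv_prefix_seg (tag seg rest : List Char) (htag : '/' ∉ tag) :
    tag.isPrefixOf (seg ++ '/' :: rest) = tag.isPrefixOf seg := by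
  rw [Bool.eq_iff_iff, List.isPrefixOf_iff_prefix, List.isPrefixOf_iff_prefix]
  constructor
  · intro hpre
    by_cases hlen : tag.length ≤ seg.length
    · have := List.prefix_iff_eq_take.mp hpre
      rw [List.take_append_of_le_length hlen] at this
      rw [this]
      exact List.take_prefix _ _
    · exfalso
      have hi : seg.length < tag.length := by omega
      have := hpre.getElem hi
      rw [List.getElem_append_right (by omega)] at this
      simp only [Nat.sub_self, List.getElem_cons_zero] at this
      exact htag (this ▸ List.getElem_mem hi)
  · intro hpre
    exact hpre.trans (List.prefix_append _ _)

-- the first '/' of seg ++ '/' :: rest is at seg.length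
theorem pv_find_first_slash (seg rest : List Char) (h : '/' ∉ seg) :
    PySem.Chars.find (seg ++ '/' :: rest) ['/'] = seg.length := by
  induction seg with
  | nil =>
    simp only [List.nil_append, List.length_nil, Nat.cast_zero]
    exact pv_find_cons_of_prefix ['/'] '/' rest (by simp [List.isPrefixOf])
  | cons c seg' ih =>
    simp only [List.mem_cons, not_or] at h
    rw [List.cons_append, pv_find_cons_of_not_prefix ['/'] c (seg' ++ '/' :: rest)
      (by simp only [List.isPrefixOf, Bool.and_true,
            beq_eq_false_iff_ne, ne_eq]; exact h.1)]
    rw [ih h.2]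
    rw [if_neg (by omega)]
    simp only [List.length_cons]
    push_cast
    omega

theorem pv_find_no_slash (l : List Char) (h : '/' ∉ l) :
    PySem.Chars.find l ['/'] = -1 := by
  induction l with
  | nil =>
    show PySem.Chars.find.go ['/'] [] 0 = -1
    rw [PySem.Chars.find.go]
    simp
  | cons c rest ih =>
    simp only [List.mem_cons, not_or] at h
    rw [pv_find_cons_of_not_prefix ['/'] c rest
      (by simp only [List.isPrefixOf, Bool.and_true,
            beq_eq_false_iff_ne, ne_eq]; exact h.1)]
    rw [ih h.2]
    simp

-- segment extraction in closed form
theorem pvSegAt_eq (chars : List Char) (p : Nat) (hp : p ≤ chars.length) :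
    pvSegAt chars p =
      if PySem.Chars.find (chars.drop p) ['/'] = -1 then chars.drop p
      else (chars.drop p).take (PySem.Chars.find (chars.drop p) ['/']).toNat := by
  unfold pvSegAt
  rw [PySem.Chars.findFrom_natCast chars ['/'] p hp]
  have hge := PySem.Chars.neg_one_le_find (chars.drop p) ['/']
  by_cases hf : PySem.Chars.find (chars.drop p) ['/'] = -1
  · rw [if_pos hf, if_pos hf, if_pos (by norm_num : (-1:Int) < 0),
      PySem.List.slice_from_natCast]
  · rw [if_neg hf, if_neg hf,
      if_neg (by omega : ¬ ((p:Int) + PySem.Chars.find (chars.drop p) ['/'] < 0))]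
    have hcast : (p : Int) + PySem.Chars.find (chars.drop p) ['/']
        = (p : Int) + ((PySem.Chars.find (chars.drop p) ['/']).toNat : Int) := by omega
    rw [hcast, PySem.List.slice_natCast_add]

-- dropping past the first separator lands in rest
theorem pv_drop_shift (seg rest : List Char) (p : Nat) :
    (seg ++ '/' :: rest).drop (p + (seg.length + 1)) = rest.drop p := by
  have h : p + (seg.length + 1) = seg.length + (p + 1) := by omega
  rw [h, List.drop_length_add_append]
  rfl

theorem pvSegAt_shift (seg rest : List Char) (p : Nat) (hp : p ≤ rest.length) :
    pvSegAt (seg ++ '/' :: rest) (p + (seg.length + 1)) = pvSegAt rest p := by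
  rw [pvSegAt_eq _ _ (by simp; omega), pvSegAt_eq _ _ hp, pv_drop_shift]

theorem pvSegAt_zero_of_split (seg rest : List Char) (h : '/' ∉ seg) :
    pvSegAt (seg ++ '/' :: rest) 0 = seg := by
  rw [pvSegAt_eq _ 0 (by omega), List.drop_zero, pv_find_first_slash seg rest h]
  rw [if_neg (by omega)]
  simp

theorem pvSegAt_zero_no_slash (l : List Char) (h : '/' ∉ l) : pvSegAt l 0 = l := by
  rw [pvSegAt_eq _ 0 (by omega), List.drop_zero, pv_find_no_slash l h]
  simp

-- find?-congruence on members
theorem pv_find?_congr {α : Type} (l : List α) (p q : α → Bool)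
    (h : ∀ x ∈ l, p x = q x) : l.find? p = l.find? q := by
  induction l with
  | nil => rfl
  | cons x t ih =>
    simp only [List.find?_cons]
    rw [h x (by simp)]
    cases q x
    · exact ih (fun y hy => h y (by simp [hy]))
    · rfl

-- position decomposition at the first '/'
theorem pvPosB_split (tag seg rest : List Char) (ht1 : tag ≠ []) (ht2 : '/' ∉ tag)
    (hseg : '/' ∉ seg) :
    pvPosB (seg ++ '/' :: rest) tag =
      ((pvPosB rest tag).map (fun p => p + (seg.length + 1))).or
        (if tag.isPrefixOf seg then some 0 else none) := by
  have ht : 1 ≤ tag.length := by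
    cases tag with
    | nil => exact absurd rfl ht1
    | cons a l => simp
  have hlen : (seg ++ '/' :: rest).length = seg.length + 1 + rest.length := by
    simp
    omega
  have hseg_false : ∀ p, 1 ≤ p → p < seg.length + 1 →
      (tag.isPrefixOf ((seg ++ '/' :: rest).drop p)
        && (p == 0 || (seg ++ '/' :: rest)[p - 1]? == some '/')) = false := by
    intro p h1 h2
    have hp1 : p - 1 < seg.length := by omega
    have hgl : (seg ++ '/' :: rest)[p - 1]? = some seg[p - 1] := by
      rw [List.getElem?_append_left hp1, List.getElem?_eq_getElem hp1]
    have hne : seg[p - 1] ≠ '/' := fun e => hseg (e ▸ List.getElem_mem hp1)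
    simp [hgl, hne]
    exact fun _ => by omega
  have hP0 : (tag.isPrefixOf ((seg ++ '/' :: rest).drop 0)
        && ((0 : Nat) == 0 || (seg ++ '/' :: rest)[0 - 1]? == some '/'))
      = tag.isPrefixOf seg := by
    simp [List.drop_zero, pv_prefix_seg tag seg rest ht2]
  by_cases hA : tag.length ≤ rest.length + 1
  · have hn : (seg ++ '/' :: rest).length + 1 - tag.length
        = (seg.length + 1) + (rest.length + 1 - tag.length) := by omega
    unfold pvPosB
    rw [hn, List.range_add, List.reverse_append, List.find?_append]
    have hfirst : ((List.range (rest.length + 1 - tag.length)).map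
          (fun x => seg.length + 1 + x)).reverse.find?
            (fun p => tag.isPrefixOf ((seg ++ '/' :: rest).drop p)
              && (p == 0 || (seg ++ '/' :: rest)[p - 1]? == some '/'))
        = (pvPosB rest tag).map (fun p => p + (seg.length + 1)) := by
      rw [← List.map_reverse, List.find?_map]
      unfold pvPosB
      rw [pv_find?_congr ((List.range (rest.length + 1 - tag.length)).reverse)
          ((fun p => tag.isPrefixOf ((seg ++ '/' :: rest).drop p)
              && (p == 0 || (seg ++ '/' :: rest)[p - 1]? == some '/'))
            ∘ (fun x => seg.length + 1 + x))
          (fun p' => tag.isPrefixOf (rest.drop p')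
              && (p' == 0 || rest[p' - 1]? == some '/')) ?hcong]
      case hcong =>
        intro p' hp'
        have hdrop : (seg ++ '/' :: rest).drop (seg.length + 1 + p') = rest.drop p' := by
          rw [(by omega : seg.length + 1 + p' = p' + (seg.length + 1)), pv_drop_shift]
        cases p' with
        | zero =>
          simp [Function.comp, hdrop]
        | succ q =>
          have hg : (seg ++ '/' :: rest)[seg.length + 1 + q]? = rest[q]? := by
            rw [(by omega : seg.length + 1 + q = seg.length + (q + 1)),
              List.getElem?_append_right (by omega)]
            simp
          simp [Function.comp, hdrop, hg]
          rw [show (seg.length + 1 + (q + 1) == 0) = false from by simp,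
            Bool.false_or]
      exact Option.map_congr (fun a _ => by omega)
    rw [hfirst]
    have hsecond : (List.range (seg.length + 1)).reverse.find?
          (fun p => tag.isPrefixOf ((seg ++ '/' :: rest).drop p)
            && (p == 0 || (seg ++ '/' :: rest)[p - 1]? == some '/'))
        = if tag.isPrefixOf seg then some 0 else none := by
      rw [pv_find_range_rev_zero _ _ hseg_false]
      by_cases hpre : tag.isPrefixOf seg
      · rw [if_pos ⟨by omega, hP0.trans hpre⟩, if_pos hpre]
      · rw [if_neg (fun hc => hpre (hP0 ▸ hc.2)), if_neg hpre]
    rw [hsecond]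
    rfl
  · have hrest : pvPosB rest tag = none := by
      unfold pvPosB
      rw [(by omega : rest.length + 1 - tag.length = 0)]
      simp
    rw [hrest]
    simp only [Option.map_none, Option.none_or]
    unfold pvPosB
    rw [pv_find_range_rev_zero _ _
      (fun p h1 h2 => hseg_false p h1 (by rw [hlen] at h2; omega))]
    by_cases hpre : tag.isPrefixOf seg
    · have hlt : tag.length ≤ seg.length :=
        (List.isPrefixOf_iff_prefix.mp hpre).length_le
      rw [if_pos ⟨by rw [hlen]; omega, hP0.trans hpre⟩, if_pos hpre]
    · rw [if_neg (fun hc => hpre (hP0 ▸ hc.2)), if_neg hpre]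

theorem pvPosB_no_slash (tag l : List Char) (ht1 : tag ≠ []) (hl : '/' ∉ l) :
    pvPosB l tag = if tag.isPrefixOf l then some 0 else none := by
  have ht : 1 ≤ tag.length := by
    cases tag with
    | nil => exact absurd rfl ht1
    | cons a t => simp
  unfold pvPosB
  rw [pv_find_range_rev_zero _ _ ?hside]
  case hside =>
    intro p h1 h2
    have hp1 : p - 1 < l.length := by omega
    have hne : l[p - 1] ≠ '/' := fun e => hl (e ▸ List.getElem_mem hp1)
    simp [List.getElem?_eq_getElem hp1, hne]
    exact fun _ => by omega
  by_cases hpre : tag.isPrefixOf l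
  · have hlt : tag.length ≤ l.length := (List.isPrefixOf_iff_prefix.mp hpre).length_le
    rw [if_pos ⟨by omega, by simp [hpre]⟩, if_pos hpre]
  · rw [if_neg (fun hc => by simp [hpre] at hc), if_neg hpre]

-- startswith is isPrefixOf with the arguments swapped
theorem pv_startswith_isPrefixOf (l t : List Char) :
    PySem.Chars.startswith l t = t.isPrefixOf l := by
  rw [Bool.eq_iff_iff, PySem.Chars.startswith_iff, List.isPrefixOf_iff_prefix]

-- the slash-free case of the main lemma
theorem pv_main_no_slash (tag chars : List Char) (ht1 : tag ≠ []) (hs : '/' ∉ chars) :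
    (pvSplitSlash chars).reverse.find? (fun seg => PySem.Chars.startswith seg tag) =
      (pvPosB chars tag).map (pvSegAt chars) := by
  rw [pvSplitSlash_no_slash chars hs, pvPosB_no_slash tag chars ht1 hs]
  by_cases hpre : tag.isPrefixOf chars
  · rw [if_pos hpre]
    simp [pv_startswith_isPrefixOf, hpre, pvSegAt_zero_no_slash chars hs]
  · rw [if_neg hpre]
    simp [pv_startswith_isPrefixOf, hpre]

-- MAIN: the reverse-find over the split parts equals the backward position scan
theorem pv_main (tag : List Char) (ht1 : tag ≠ []) (ht2 : '/' ∉ tag) :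
    ∀ (n : Nat) (chars : List Char), chars.length ≤ n →
    (pvSplitSlash chars).reverse.find? (fun seg => PySem.Chars.startswith seg tag) =
      (pvPosB chars tag).map (pvSegAt chars) := by
  intro n
  induction n with
  | zero =>
    intro chars hc
    have h0 : chars = [] := List.eq_nil_of_length_eq_zero (by omega)
    subst h0
    exact pv_main_no_slash tag [] ht1 (by simp)
  | succ m ih =>
    intro chars hc
    by_cases hs : '/' ∈ chars
    · -- decompose at the first '/'
      have hdecomp := List.takeWhile_append_dropWhile
        (p := fun c => !(c == '/')) (l := chars)
      have hdw : chars.dropWhile (fun c => !(c == '/')) ≠ [] := by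
        intro hnil
        rw [hnil, List.append_nil] at hdecomp
        have := List.mem_takeWhile_imp (hdecomp ▸ hs)
        simp at this
      obtain ⟨c, rest, hcr⟩ : ∃ c rest,
          chars.dropWhile (fun c => !(c == '/')) = c :: rest := by
        cases h : chars.dropWhile (fun c => !(c == '/')) with
        | nil => exact absurd h hdw
        | cons c rest => exact ⟨c, rest, rfl⟩
      have hc0 : (chars.dropWhile (fun c => !(c == '/'))).head hdw = c := by
        simp [hcr]
      have hh := List.head_dropWhile_not (fun c => !(c == '/')) (l := chars) hdw
      rw [hc0] at hh
      have hc' : c = '/' := by simpa using hh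
      subst hc'
      have heq : chars = chars.takeWhile (fun c => !(c == '/')) ++ '/' :: rest := by
        conv_lhs => rw [← hdecomp]
        rw [hcr]
      have hseg : '/' ∉ chars.takeWhile (fun c => !(c == '/')) := by
        intro hm
        simpa using List.mem_takeWhile_imp hm
      have hrl : rest.length ≤ m := by
        have hl := congrArg List.length heq
        simp at hl
        omega
      rw [heq, pvSplitSlash_append _ rest hseg, List.reverse_cons, List.find?_append,
        ih rest hrl, pvPosB_split tag _ rest ht1 ht2 hseg]
      cases hP : pvPosB rest tag with
      | none =>
        simp only [Option.map_none, Option.none_or]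
        by_cases hpre : tag.isPrefixOf (chars.takeWhile (fun c => !(c == '/')))
        · rw [if_pos hpre]
          simp [pv_startswith_isPrefixOf, hpre, pvSegAt_zero_of_split _ rest hseg]
        · rw [if_neg hpre]
          simp [pv_startswith_isPrefixOf, hpre]
      | some p' =>
        have hp'le : p' ≤ rest.length := by
          have hmem := List.mem_of_find?_eq_some hP
          have := List.mem_range.mp (List.mem_reverse.mp hmem)
          have ht : 1 ≤ tag.length := by
            cases tag with
            | nil => exact absurd rfl ht1
            | cons a t => simp
          omega
        simp only [Option.map_some, Option.some_or]
        rw [pvSegAt_shift _ rest p' hp'le]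
    · exact pv_main_no_slash tag chars ht1 hs

-- string-level corollary for one tag
theorem pv_component (dn : String) (tag : String) (ht1 : tag.toList ≠ [])
    (ht2 : '/' ∉ tag.toList) :
    ((pySplitSlash dn).reverse.find? (fun p => PySem.Str.startswith p tag)).getD "" =
      String.ofList (pvLastSeg dn.toList tag.toList) := by
  have hmap := PySem.Str.split?_map dn "/"
  rw [PySem.Chars.split?, if_neg (by decide),
    show ("/" : String).toList = ['/'] from by decide, pv_splitOn_eq] at hmap
  cases hS : PySem.Str.split? dn "/" with
  | none => rw [hS] at hmap; simp at hmap
  | some L =>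
    rw [hS] at hmap
    simp only [Option.map_some, Option.some.injEq] at hmap
    have hps : pySplitSlash dn = L := by rw [pySplitSlash, hS]; rfl
    rw [hps]
    have hfind : (pvSplitSlash dn.toList).reverse.find?
          (fun l => PySem.Chars.startswith l tag.toList)
        = (L.reverse.find? (fun p => PySem.Str.startswith p tag)).map String.toList := by
      rw [← hmap, ← List.map_reverse, List.find?_map]
      exact congrArg (Option.map String.toList) (pv_find?_congr _ _ _
        (fun x _ => by simp [Function.comp, PySem.Str.startswith_eq]))
    rw [pv_main tag.toList ht1 ht2 dn.toList.length dn.toList le_rfl] at hfind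
    unfold pvLastSeg
    cases hPos : pvPosB dn.toList tag.toList with
    | none =>
      rw [hPos, Option.map_none] at hfind
      cases hF : L.reverse.find? (fun p => PySem.Str.startswith p tag) with
      | none => rfl
      | some q => rw [hF, Option.map_some] at hfind; simp at hfind
    | some p =>
      rw [hPos, Option.map_some] at hfind
      cases hF : L.reverse.find? (fun p => PySem.Str.startswith p tag) with
      | none => rw [hF, Option.map_none] at hfind; simp at hfind
      | some q =>
        rw [hF, Option.map_some] at hfind
        rw [Option.getD_some]
        have hq : q.toList = pvSegAt dn.toList p := by
          have := hfind
          simp only [Option.some.injEq] at this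
          exact this.symm
        show q = String.ofList (pvSegAt dn.toList p)
        rw [← hq, String.ofList_toList]

-- the domain component, with the replace applied on both sides
theorem pv_component_dom (dn : String) :
    (((pySplitSlash dn).reverse.find? (fun p => PySem.Str.startswith p "dom-")).map
        (fun p => PySem.Str.replace p "dom-" "")).getD "" =
      PySem.Str.replace (String.ofList (pvLastSeg dn.toList "dom-".toList)) "dom-" "" := by
  have h := pv_component dn "dom-" (by decide) (by decide)
  cases hf : (pySplitSlash dn).reverse.find? (fun p => PySem.Str.startswith p "dom-") with
  | none =>
    rw [hf, Option.getD_none] at h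
    rw [Option.map_none, Option.getD_none, ← h]
    decide
  | some p =>
    rw [hf, Option.getD_some] at h
    rw [Option.map_some, Option.getD_some, h]

-- ===== VERDICT (by name: the statement is the Claim_ definition above) =====
theorem parse_urib_dn_spec : Claim_equal_parse_urib_dn := by
  intro dn _
  unfold Spec_parse_urib_dn
  show parse_urib_dn dn = parse_urib_dn_alt dn
  simp only [parse_urib_dn, parse_urib_dn_alt]
  rw [pv_loop_last]
  exact Prod.ext (pv_component dn "node-" (by decide) (by decide))
    (Prod.ext (pv_component_dom dn) (pv_prefix_eq dn))
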